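-- pv_equiv track=rewrite | github.com/Dhruv-bansal15/CP | Problems done in python/color_me_yellow.py | Counting_no_of_coloumns_painted
-- ===== SOURCE A (Python) =====
-- def Counting_no_of_coloumns_painted(n,r,g,b):
-- 	atmost_coloumns_that_can_be_painted= min(r,b)
-- 	count=0
-- 	if (atmost_coloumns_that_can_be_painted - g)>=0:
-- 		count= g
-- 	else:
-- 		count= atmost_coloumns_that_can_be_painted
-- 		return count
-- 	color_with_less_amount_left= atmost_coloumns_that_can_be_painted - g #from red and blue
-- 	color_with_large_amount_left= max(r,b) - g                           #from red and blue
--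
-- 	if color_with_less_amount_left==color_with_large_amount_left:
-- 		count+= (color_with_large_amount_left * 2)//3
-- 		if count>n:
-- 			return n
-- 		return count
-- 	else:
-- 		while color_with_less_amount_left>0 and color_with_large_amount_left>0:
-- 			color_with_large_amount_left-=2
-- 			color_with_less_amount_left-=1
-- 			count+=1
-- 			if color_with_large_amount_left==color_with_less_amount_left:
-- 				count+= (color_with_large_amount_left*2)//3
-- 				if count>n:
-- 					return n
-- 				return count
-- 		if count>n:
-- 			return n
-- 		return count
-- 	if count>n:
-- 		return n
-- 	return count
-- ===== SOURCE B (Python) =====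
-- def Counting_no_of_coloumns_painted(n, r, g, b):
--     # O(1) closed form: the loop in A narrows the gap between the two leftover
--     # counters by 1 per step, so it meets after exactly (max-min) steps.
--     m = min(r, b)
--     if m < g:
--         return m
--     surplus = m - g            # leftover of the smaller of r, b after painting g
--     gap = max(r, b) - m        # how much bigger the larger color is
--     if gap <= surplus:
--         c = g + gap + (2 * (surplus - gap)) // 3
--     else:
--         c = g + surplus
--     return min(c, n)
-- ===== Notes on version B (the rewrite author's own statement) =====
-- stated objective: faster
-- what changed: Replaced A's step-by-step while loop (which decrements the two leftover counters until they meet) by closed-form arithmetic: the counters meet after exactly max(r,b)-min(r,b) steps, so the answer is computed directly.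
import Mathlib
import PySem

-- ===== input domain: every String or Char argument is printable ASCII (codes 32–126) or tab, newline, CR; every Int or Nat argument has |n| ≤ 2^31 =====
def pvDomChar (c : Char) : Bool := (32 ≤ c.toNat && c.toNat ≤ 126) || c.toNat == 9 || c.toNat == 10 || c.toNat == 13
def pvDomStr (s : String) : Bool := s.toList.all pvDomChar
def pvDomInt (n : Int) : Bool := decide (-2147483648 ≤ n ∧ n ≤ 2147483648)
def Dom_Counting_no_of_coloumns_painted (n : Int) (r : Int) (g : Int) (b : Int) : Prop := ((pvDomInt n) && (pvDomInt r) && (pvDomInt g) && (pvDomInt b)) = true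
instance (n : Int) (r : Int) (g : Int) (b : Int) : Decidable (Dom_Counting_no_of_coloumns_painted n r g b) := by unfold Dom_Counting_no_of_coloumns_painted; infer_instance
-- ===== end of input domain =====

-- B replaces A's step-by-step while loop by O(1) closed-form arithmetic (the loop's two
-- counters meet after exactly max(r,b)-min(r,b) steps); objective: faster (asymptotic).

-- ===== PORT A =====
-- the while loop of A: state (less, large, count), literal transcription
def pvPaintLoop (n : Int) (less : Int) (large : Int) (count : Int) : Int :=
  if _h : less > 0 ∧ large > 0 then
    let large' := large - 2
    let less' := less - 1
    let count' := count + 1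
    if large' = less' then
      let c2 := count' + PySem.Int.floordiv (large' * 2) 3
      if c2 > n then n else c2
    else
      pvPaintLoop n less' large' count'
  else
    if count > n then n else count
termination_by less.toNat
decreasing_by omega

def Counting_no_of_coloumns_painted (n : Int) (r : Int) (g : Int) (b : Int) : Int :=
  let atmost := min r b
  if atmost - g ≥ 0 then
    let count : Int := g
    let less := atmost - g
    let large := max r b - g
    if less = large then
      let c := count + PySem.Int.floordiv (large * 2) 3
      if c > n then n else c
    else
      pvPaintLoop n less large count
  else
    atmost

-- ===== PORT B =====
def Counting_no_of_coloumns_painted_alt (n : Int) (r : Int) (g : Int) (b : Int) : Int :=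
  let m := min r b
  if m < g then m
  else
    let surplus := m - g
    let gap := max r b - m
    let c := if gap ≤ surplus
             then g + gap + PySem.Int.floordiv (2 * (surplus - gap)) 3
             else g + surplus
    min c n

-- ===== PRECONDITION & SPEC =====
def Spec_Counting_no_of_coloumns_painted (n : Int) (r : Int) (g : Int) (b : Int) (out : Int) : Prop := out = Counting_no_of_coloumns_painted_alt n r g b
instance (n : Int) (r : Int) (g : Int) (b : Int) (out : Int) : Decidable (Spec_Counting_no_of_coloumns_painted n r g b out) := by unfold Spec_Counting_no_of_coloumns_painted; infer_instance

-- ===== CLAIM (what is proved, stated in full; the proofs are below) =====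
def Claim_equal_Counting_no_of_coloumns_painted : Prop := ∀ (n : Int) (r : Int) (g : Int) (b : Int), Dom_Counting_no_of_coloumns_painted n r g b → Spec_Counting_no_of_coloumns_painted n r g b (Counting_no_of_coloumns_painted n r g b)

-- ===== LEMMAS AND PROOFS =====

-- The loop meets (large' = less') after exactly (large - less) steps; closed form of the loop.
theorem pvPaintLoop_eq (k : Nat) : ∀ (n less large count : Int), less = (k : Int) → less < large →
    pvPaintLoop n less large count =
      min (if large - less ≤ less
           then count + (large - less) + PySem.Int.floordiv (2 * (less - (large - less))) 3
           else count + less) n := by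
  induction k with
  | zero =>
    intro n less large count hk hlt
    rw [pvPaintLoop, dif_neg (by omega : ¬ (less > 0 ∧ large > 0)),
        if_neg (by omega : ¬ (large - less ≤ less))]
    rw [Int.min_def]; split_ifs <;> omega
  | succ k ih =>
    intro n less large count hk hlt
    rw [pvPaintLoop, dif_pos (by omega : less > 0 ∧ large > 0)]
    simp only []
    by_cases heq : large - 2 = less - 1
    · rw [if_pos heq,
          show (large - 2) * 2 = 2 * (less - (large - less)) by omega,
          if_pos (by omega : large - less ≤ less)]
      rw [Int.min_def]; split_ifs <;> omega
    · rw [if_neg heq,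
          ih n (less - 1) (large - 2) (count + 1) (by omega) (by omega),
          show large - 2 - (less - 1) = large - less - 1 by ring,
          show less - 1 - (large - less - 1) = less - (large - less) by ring]
      by_cases hle : large - less ≤ less
      · rw [if_pos (by omega : large - less - 1 ≤ less - 1), if_pos hle,
            show count + 1 + (large - less - 1) = count + (large - less) by ring]
      · rw [if_neg (by omega : ¬ large - less - 1 ≤ less - 1), if_neg hle,
            show count + 1 + (less - 1) = count + less by ring]

-- ===== VERDICT (by name: the statement is the Claim_ definition above) =====
theorem Counting_no_of_coloumns_painted_spec : Claim_equal_Counting_no_of_coloumns_painted := by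
  intro n r g b _hdom
  unfold Spec_Counting_no_of_coloumns_painted
  unfold Counting_no_of_coloumns_painted Counting_no_of_coloumns_painted_alt
  simp only []
  set m := min r b with hm
  have hmM : m ≤ max r b := by omega
  by_cases hge : m - g ≥ 0
  · rw [if_pos hge, if_neg (by omega : ¬ m < g)]
    set less := m - g with hless
    set large := max r b - g with hlarge
    have hgap : max r b - m = large - less := by omega
    rw [hgap]
    by_cases heq : less = large
    · rw [if_pos heq, if_pos (by omega : large - less ≤ less),
          show large * 2 = 2 * (less - (large - less)) by omega]
      rw [Int.min_def]; split_ifs <;> omega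
    · rw [if_neg heq,
          pvPaintLoop_eq less.toNat n less large g (by omega) (by omega)]
  · rw [if_neg hge, if_pos (by omega : m < g)]
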